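-- pv_equiv track=rewrite | github.com/BBDrive/Chinese-Restaurant-Processes | crp.py | stirling
-- ===== SOURCE A (Python) =====
-- def stirling(n, k):
--     if n <= 0:
--         return 1
--     elif k <= 0:
--         return 0
--     elif n == k:
--         return 1
--     elif n != 0 and n == k:
--         return 1
--     elif k > n:
--         return 0
--     else:
--         return (n - 1) * stirling(n - 1, k) + stirling(n - 1, k - 1)
-- ===== SOURCE B (Python) =====
-- def stirling(n, k):
--     if n <= 0:
--         return 1
--     if k <= 0:
--         return 0
--     if k > n:
--         return 0
--     if k == n:
--         return 1
--     row = [1] + [0] * k  # row[j] = c(0, j)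
--     for m in range(1, n + 1):
--         row = [0] + [(m - 1) * row[j] + row[j - 1] for j in range(1, k + 1)]
--     return row[k]
-- ===== Notes on version B (the rewrite author's own statement) =====
-- stated objective: alternative
-- what changed: Replaced the exponential two-branch recursion with a bottom-up dynamic-programming row that applies the Stirling recurrence once per (m,j) cell; Pre_ excludes deep-recursion inputs (0<k<n with n>990) on which A raises RecursionError.
-- outside the precondition, e.g. on stirling(995, 994): A returns 494515, B returns 494515
import Mathlib
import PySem

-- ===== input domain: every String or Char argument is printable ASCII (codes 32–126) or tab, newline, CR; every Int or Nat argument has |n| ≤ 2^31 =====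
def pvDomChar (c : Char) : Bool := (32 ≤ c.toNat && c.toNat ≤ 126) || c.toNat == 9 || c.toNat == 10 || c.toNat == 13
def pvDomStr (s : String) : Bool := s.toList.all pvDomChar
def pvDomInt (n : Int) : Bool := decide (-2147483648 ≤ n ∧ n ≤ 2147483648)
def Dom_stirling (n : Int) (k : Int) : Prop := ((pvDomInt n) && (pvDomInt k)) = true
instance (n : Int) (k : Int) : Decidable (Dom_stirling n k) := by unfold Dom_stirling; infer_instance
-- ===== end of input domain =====

-- B replaces A's double recursion by a bottom-up DP row over the same Stirling recurrence.

-- ===== PORT A =====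
def stirling (n : Int) (k : Int) : Int :=
  if n ≤ 0 then 1
  else if k ≤ 0 then 0
  else if n = k then 1
  else if n ≠ 0 ∧ n = k then 1
  else if k > n then 0
  else (n - 1) * stirling (n - 1) k + stirling (n - 1) (k - 1)
termination_by n.toNat
decreasing_by all_goals omega

-- ===== PORT B =====
def stirling_alt (n : Int) (k : Int) : Int :=
  if n ≤ 0 then 1
  else if k ≤ 0 then 0
  else if k > n then 0
  else if k = n then 1
  else
    let row0 : List Int := 1 :: List.replicate k.toNat 0
    let row := (PySem.List.pyRange 1 (n + 1) 1).foldl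
      (fun row m =>
        0 :: (PySem.List.pyRange 1 (k + 1) 1).map
          (fun j => (m - 1) * PySem.List.pyGetD row j 0 + PySem.List.pyGetD row (j - 1) 0))
      row0
    PySem.List.pyGetD row k 0

-- ===== PRECONDITION & SPEC =====
-- Pre_ excludes the deep-recursion inputs 0 < k < n with n > 990, on which CPython's
-- recursion limit makes A raise RecursionError (the cutoff is slightly conservative because
-- near the limit whether A returns depends on the caller's stack depth).
def Pre_stirling (n : Int) (k : Int) : Prop := k < 1 ∨ n ≤ k ∨ n ≤ 990
instance (n : Int) (k : Int) : Decidable (Pre_stirling n k) := by unfold Pre_stirling; infer_instance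
def pvWitness_stirling : Int × Int := (5, 3)

def Spec_stirling (n : Int) (k : Int) (out : Int) : Prop := out = stirling_alt n k
instance (n : Int) (k : Int) (out : Int) : Decidable (Spec_stirling n k out) := by unfold Spec_stirling; infer_instance

-- ===== CLAIM (what is proved, stated in full; the proofs are below) =====
def Claim_equal_stirling : Prop := ∀ (n : Int) (k : Int), Dom_stirling n k → Pre_stirling n k → Spec_stirling n k (stirling n k)

-- ===== LEMMAS AND PROOFS =====

/-- The mathematical recurrence both programs compute (unsigned Stirling, first kind). -/
def pvC : Nat → Nat → Int
  | 0, 0 => 1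
  | 0, _ + 1 => 0
  | _ + 1, 0 => 0
  | m + 1, j + 1 => (m : Int) * pvC m (j + 1) + pvC m j

lemma pvStep_eq (K N : Nat) (m : Int) (hm : m = (N : Int) + 1) :
    (0 : Int) :: (PySem.List.pyRange 1 ((K : Int) + 1) 1).map
      (fun j => (m - 1) * PySem.List.pyGetD ((List.range (K + 1)).map (pvC N)) j 0
        + PySem.List.pyGetD ((List.range (K + 1)).map (pvC N)) (j - 1) 0)
    = (List.range (K + 1)).map (pvC (N + 1)) := by
  apply List.ext_getElem
  · simp [PySem.List.length_pyRange_one]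
  · intro i hi1 hi2
    cases i with
    | zero =>
      simp [pvC]
    | succ i =>
      have hlen : i < (PySem.List.pyRange 1 ((K : Int) + 1) 1).length := by
        rw [PySem.List.length_pyRange_one]
        simp at hi2
        omega
      have hiK : i < K := by
        rw [PySem.List.length_pyRange_one] at hlen; omega
      simp only [List.getElem_cons_succ, List.getElem_map]
      rw [PySem.List.getElem_pyRange_one]
      have e1 : PySem.List.pyGetD ((List.range (K + 1)).map (pvC N)) (1 + (i : Int)) 0
          = pvC N (i + 1) := by
        rw [show (1 + (i : Int)) = ((i + 1 : Nat) : Int) by push_cast; ring,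
          PySem.List.pyGetD_natCast,
          List.getD_eq_getElem _ _ (by simp; omega)]
        simp
      have e2 : PySem.List.pyGetD ((List.range (K + 1)).map (pvC N)) (1 + (i : Int) - 1) 0
          = pvC N i := by
        rw [show (1 + (i : Int) - 1) = ((i : Nat) : Int) by ring,
          PySem.List.pyGetD_natCast,
          List.getD_eq_getElem _ _ (by simp; omega)]
        simp
      rw [e1, e2, List.getElem_range]
      rw [show pvC (N + 1) (i + 1) = (N : Int) * pvC N (i + 1) + pvC N i from rfl, hm]
      ring

lemma pvFold_eq (K : Nat) : ∀ M : Nat,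
    (PySem.List.pyRange 1 ((M : Int) + 1) 1).foldl
      (fun row m =>
        0 :: (PySem.List.pyRange 1 ((K : Int) + 1) 1).map
          (fun j => (m - 1) * PySem.List.pyGetD row j 0 + PySem.List.pyGetD row (j - 1) 0))
      (1 :: List.replicate K 0)
    = (List.range (K + 1)).map (pvC M) := by
  intro M
  induction M with
  | zero =>
    rw [PySem.List.pyRange_one_eq_nil (show ((0:Nat):Int)+1 ≤ 1 by norm_num)]
    simp only [List.foldl_nil]
    apply List.ext_getElem
    · simp
    · intro i hi1 hi2
      cases i with
      | zero => simp [pvC]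
      | succ i =>
        simp only [List.getElem_cons_succ, List.getElem_map, List.getElem_range]
        rw [List.getElem_replicate, show pvC 0 (i + 1) = 0 from rfl]
  | succ M ih =>
    have hcast : ((M + 1 : Nat) : Int) + 1 = ((M : Int) + 1) + 1 := by push_cast; ring
    rw [hcast,
      PySem.List.pyRange_one_append 1 ((M : Int) + 1) (((M : Int) + 1) + 1) (by omega) (by omega),
      List.foldl_append, ih,
      PySem.List.pyRange_one_cons (show ((M:Int)+1) < ((M:Int)+1)+1 by omega),
      PySem.List.pyRange_one_eq_nil (show ((M:Int)+1)+1 ≤ ((M:Int)+1)+1 by omega)]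
    simp only [List.foldl_cons, List.foldl_nil]
    exact pvStep_eq K M ((M : Int) + 1) rfl

lemma pvC_gt : ∀ m j : Nat, m < j → pvC m j = 0 := by
  intro m
  induction m with
  | zero => intro j h; cases j with | zero => omega | succ j => simp [pvC]
  | succ m ih =>
    intro j h
    cases j with
    | zero => omega
    | succ j => simp [pvC, ih j (by omega), ih (j+1) (by omega)]

lemma pvC_diag : ∀ m : Nat, pvC m m = 1 := by
  intro m
  induction m with
  | zero => simp [pvC]
  | succ m ih => simp [pvC, ih, pvC_gt m (m+1) (by omega)]

lemma pvC_zero_right (m : Nat) (hm : 1 ≤ m) : pvC m 0 = 0 := by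
  cases m with
  | zero => omega
  | succ m => simp [pvC]

/-- A's recursion equals pvC on 1 ≤ k ≤ n. -/
lemma stirling_eq_pvC : ∀ (N : Nat) (n k : Int), n = (N : Int) → 1 ≤ k → k ≤ n →
    stirling n k = pvC n.toNat k.toNat := by
  intro N
  induction N with
  | zero => intro n k hn hk hkn; omega
  | succ N ih =>
    intro n k hn hk hkn
    rw [stirling]
    have hn0 : ¬ n ≤ 0 := by omega
    have hk0 : ¬ k ≤ 0 := by omega
    rw [if_neg hn0, if_neg hk0]
    by_cases hdiag : n = k
    · rw [if_pos hdiag]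
      rw [show n.toNat = k.toNat by omega, pvC_diag]
    · rw [if_neg hdiag, if_neg (by tauto), if_neg (by omega)]
      have hN : (n - 1).toNat = N := by omega
      have hnt : n.toNat = N + 1 := by omega
      have hn1 : n - 1 = (N : Int) := by omega
      have h1 : stirling (n - 1) k = pvC N k.toNat := by
        rw [ih (n - 1) k (by omega) hk (by omega), hN]
      have h2 : stirling (n - 1) (k - 1) = pvC N (k - 1).toNat := by
        by_cases hk1 : k = 1
        · subst hk1
          rw [stirling, if_neg (show ¬ n - 1 ≤ 0 by omega),
            if_pos (show (1:Int) - 1 ≤ 0 by norm_num),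
            show ((1:Int) - 1).toNat = 0 by decide, pvC_zero_right N (by omega)]
        · rw [ih (n - 1) (k - 1) (by omega) (by omega) (by omega), hN]
      rw [h1, h2, hnt, hn1]
      have hkt : k.toNat = (k - 1).toNat + 1 := by omega
      rw [hkt, pvC, ← hkt]

-- ===== VERDICT (by name: the statement is the Claim_ definition above) =====
theorem stirling_spec : Claim_equal_stirling := by
  intro n k _ _
  unfold Spec_stirling stirling_alt
  by_cases hn : n ≤ 0
  · rw [stirling, if_pos hn]; rw [if_pos hn]
  · rw [if_neg hn]
    by_cases hk : k ≤ 0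
    · rw [stirling, if_neg hn, if_pos hk, if_pos hk]
    · rw [if_neg hk]
      by_cases hkn : k > n
      · rw [if_pos hkn, stirling, if_neg hn, if_neg hk,
          if_neg (by omega), if_neg (by intro h; omega), if_pos hkn]
      · rw [if_neg hkn]
        by_cases hd : k = n
        · rw [if_pos hd, stirling, if_neg hn, if_neg hk, if_pos hd.symm]
        · rw [if_neg hd]
          set K := k.toNat with hK
          set M := n.toNat with hM
          have hkk : k = (K : Int) := by omega
          have hnn : n = (M : Int) := by omega
          rw [stirling_eq_pvC M n k hnn (by omega) (by omega)]
          simp only [hkk, hnn]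
          rw [show Int.toNat (M : Int) = M by omega, show Int.toNat (K : Int) = K by omega,
            pvFold_eq K M, PySem.List.pyGetD_natCast,
            List.getD_eq_getElem _ _ (by simp)]
          simp
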